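-- pv_equiv track=rewrite | github.com/evanwtf/limerick-benchmark | benchmark/agent.py | _normalize_dependency_name
-- ===== SOURCE A (Python) =====
-- def _normalize_dependency_name(spec: str) -> str:
--     """Normalize a dependency specifier to its package name."""
--     token = spec.strip()
--     if not token:
--         return ""
--     token = token.split(";")[0].strip()
--     for marker in ("[", "=", "<", ">", "!", "~"):
--         if marker in token:
--             token = token.split(marker, 1)[0]
--     return token.strip().lower().replace("_", "-")
-- ===== SOURCE B (Python) =====
-- def _normalize_dependency_name(spec: str) -> str:
--     """Normalize a dependency specifier to its package name."""
--     out = []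
--     for ch in spec:
--         if ch in ";[=<>!~":
--             break
--         out.append("-" if ch == "_" else ch.lower())
--     return "".join(out).strip()
-- ===== Notes on version B (the rewrite author's own statement) =====
-- stated objective: simpler
-- what changed: Replaces A's staged pipeline (strip, split on the semicolon, six per-marker membership tests each followed by a split, then strip/lower/replace) by one left-to-right scan that stops at the first of the seven delimiter characters and lowercases and rewrites underscores on the fly, followed by a single final strip.
import Mathlib
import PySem

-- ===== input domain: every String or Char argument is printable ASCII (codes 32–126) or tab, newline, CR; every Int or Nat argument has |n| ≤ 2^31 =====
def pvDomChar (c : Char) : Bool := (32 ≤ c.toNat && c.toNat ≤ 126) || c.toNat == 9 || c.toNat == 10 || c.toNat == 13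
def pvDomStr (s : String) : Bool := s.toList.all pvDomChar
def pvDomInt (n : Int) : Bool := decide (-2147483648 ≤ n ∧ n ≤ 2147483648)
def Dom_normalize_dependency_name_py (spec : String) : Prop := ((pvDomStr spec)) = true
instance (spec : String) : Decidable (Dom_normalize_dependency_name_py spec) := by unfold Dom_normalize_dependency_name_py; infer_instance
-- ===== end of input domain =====

-- B replaces A's staged pipeline (strip, split on ';', six per-marker membership tests and
-- splits, then strip/lower/replace) by ONE left-to-right scan that stops at the first of the
-- seven delimiter characters and lowercases / maps '_'→'-' on the fly, plus one final strip
-- (objective: simpler).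

-- ===== PORT A =====
-- the six markers, in A's iteration order
def pvMarkers : List Char := ['[', '=', '<', '>', '!', '~']

def normalize_dependency_name_py (spec : String) : String :=
  let token := PySem.Chars.strip spec.toList
  if token = [] then ""
  else
    let token := PySem.Chars.strip ((PySem.Chars.splitOn token [';']).headD [])
    let token := pvMarkers.foldl
      (fun t m => if PySem.Chars.isIn [m] t then (PySem.Chars.splitOnMax t [m] 1).headD [] else t)
      token
    String.ofList (PySem.Chars.replace (PySem.Chars.lower (PySem.Chars.strip token)) ['_'] ['-'])

-- ===== PORT B =====
-- Source B: one scan over spec; break at the first char of ";[=<>!~", otherwise emit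
-- '-' for '_' and ch.lower() for everything else; finally strip the joined result.
def pvScanB : List Char → List Char
  | [] => []
  | c :: rest =>
      if ([';', '[', '=', '<', '>', '!', '~'] : List Char).contains c then []
      else (if c = '_' then '-' else PySem.Chars.lowerChar c) :: pvScanB rest

def normalize_dependency_name_py_alt (spec : String) : String :=
  String.ofList (PySem.Chars.strip (pvScanB spec.toList))

-- ===== PRECONDITION & SPEC =====
def Spec_normalize_dependency_name_py (spec : String) (out : String) : Prop := out = normalize_dependency_name_py_alt spec
instance (spec : String) (out : String) : Decidable (Spec_normalize_dependency_name_py spec out) := by unfold Spec_normalize_dependency_name_py; infer_instance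

-- ===== CLAIM (what is proved, stated in full; the proofs are below) =====
def Claim_equal_normalize_dependency_name_py : Prop := ∀ (spec : String), Dom_normalize_dependency_name_py spec → Spec_normalize_dependency_name_py spec (normalize_dependency_name_py spec)

-- ===== LEMMAS AND PROOFS =====

-- abbreviations used throughout the proofs
-- f is B's per-character transform; p7 is "not one of the seven delimiters"
def pvF (c : Char) : Char := if c = '_' then '-' else PySem.Chars.lowerChar c
def pvP7 (a : Char) : Bool := !([';', '[', '=', '<', '>', '!', '~'] : List Char).contains a

-- ---------- character-level facts ----------
lemma pv_toNat_ofNat (n : Nat) (h : n < 55296) : (Char.ofNat n).toNat = n := by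
  simp only [Char.ofNat, Nat.isValidChar]
  rw [dif_pos (Or.inl h)]
  rfl

lemma pv_upper_bounds (c : Char) (h : PySem.Chars.isupper c = true) : 65 ≤ c.toNat ∧ c.toNat ≤ 90 := by
  unfold PySem.Chars.isupper at h
  simp only [Bool.and_eq_true, decide_eq_true_eq] at h
  exact ⟨Fin.mk_le_mk.mp h.1, Fin.mk_le_mk.mp h.2⟩

lemma pv_lower_toNat (c : Char) (h : PySem.Chars.isupper c = true) : (PySem.Chars.lowerChar c).toNat = c.toNat + 32 := by
  unfold PySem.Chars.lowerChar
  rw [if_pos h, pv_toNat_ofNat]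
  have := pv_upper_bounds c h; omega

lemma pv_isspace_of_toNat (c : Char) (h : 33 ≤ c.toNat ∧ c.toNat ≤ 126) : PySem.Chars.isspace c = false := by
  unfold PySem.Chars.isspace
  simp only [Bool.or_eq_false_iff, Bool.and_eq_false_iff, decide_eq_false_iff_not]
  omega

-- B's transform preserves whitespace-ness
lemma pv_isspace_pvF (c : Char) : PySem.Chars.isspace (pvF c) = PySem.Chars.isspace c := by
  unfold pvF
  by_cases hu : c = '_'
  · subst hu; decide
  · rw [if_neg hu]
    by_cases h : PySem.Chars.isupper c = true
    · have hb := pv_upper_bounds c h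
      rw [pv_isspace_of_toNat c ⟨by omega, by omega⟩,
          pv_isspace_of_toNat _ (by rw [pv_lower_toNat c h]; omega)]
    · unfold PySem.Chars.lowerChar
      rw [if_neg h]

lemma pv_lowerChar_underscore (c : Char) : (PySem.Chars.lowerChar c = '_') ↔ c = '_' := by
  constructor
  · intro hl
    by_cases h : PySem.Chars.isupper c = true
    · exfalso
      have h1 := pv_lower_toNat c h
      rw [hl] at h1
      have h2 := pv_upper_bounds c h
      have h95 : ('_').toNat = 95 := by decide
      omega
    · unfold PySem.Chars.lowerChar at hl; rwa [if_neg h] at hl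
  · rintro rfl; decide

-- a whitespace character is none of the seven delimiters
lemma pv_ws_p7 (c : Char) (h : PySem.Chars.isspace c = true) : pvP7 c = true := by
  have hn : ¬ (c.toNat = 59 ∨ c.toNat = 91 ∨ c.toNat = 61 ∨ c.toNat = 60 ∨ c.toNat = 62 ∨ c.toNat = 33 ∨ c.toNat = 126) := by
    unfold PySem.Chars.isspace at h
    simp only [Bool.or_eq_true, Bool.and_eq_true, decide_eq_true_eq] at h
    omega
  unfold pvP7
  simp only [List.contains_cons, List.contains_nil, Bool.or_false, Bool.not_eq_true',
             Bool.or_eq_false_iff, beq_eq_false_iff_ne, Ne]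
  refine ⟨fun hc => ?_, fun hc => ?_, fun hc => ?_, fun hc => ?_, fun hc => ?_, fun hc => ?_, fun hc => ?_⟩ <;>
    (subst hc; exact hn (by decide))

-- ---------- strip as dropWhile on both ends ----------
lemma pv_strip_eq (cs : List Char) :
    PySem.Chars.strip cs
      = ((cs.dropWhile PySem.Chars.isspace).reverse.dropWhile PySem.Chars.isspace).reverse := by
  simp [PySem.Chars.strip, PySem.Chars.lstrip, PySem.Chars.rstrip]

lemma pv_dropWhile_idem (p : Char → Bool) (x : List Char) :
    (x.dropWhile p).dropWhile p = x.dropWhile p := by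
  induction x with
  | nil => rfl
  | cons a r ih =>
    by_cases h : p a = true
    · simpa [h] using ih
    · simp [h]

-- strip of an all-whitespace list is empty, and conversely
lemma pv_strip_nil_iff (cs : List Char) :
    PySem.Chars.strip cs = [] ↔ ∀ c ∈ cs, PySem.Chars.isspace c = true := by
  rw [pv_strip_eq]
  constructor
  · intro h c hc
    rw [List.reverse_eq_nil_iff, List.dropWhile_eq_nil_iff] at h
    have h2 : ∀ x ∈ cs.dropWhile PySem.Chars.isspace, PySem.Chars.isspace x = true :=
      fun x hx => h x (List.mem_reverse.mpr hx)
    have h3 : ∀ x ∈ cs.takeWhile PySem.Chars.isspace, PySem.Chars.isspace x = true :=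
      fun x hx => List.mem_takeWhile_imp hx
    rw [← List.takeWhile_append_dropWhile (p := PySem.Chars.isspace) (l := cs)] at hc
    rcases List.mem_append.mp hc with h4 | h4
    · exact h3 c h4
    · exact h2 c h4
  · intro h
    rw [List.reverse_eq_nil_iff, List.dropWhile_eq_nil_iff]
    intro x hx
    exact h x ((List.dropWhile_sublist _).mem (List.mem_reverse.mp hx))

-- appending all-whitespace on the right does not change strip
lemma pv_strip_append_ws (u w : List Char) (hw : ∀ c ∈ w, PySem.Chars.isspace c = true) :
    PySem.Chars.strip (u ++ w) = PySem.Chars.strip u := by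
  have hwnil : w.dropWhile PySem.Chars.isspace = [] :=
    List.dropWhile_eq_nil_iff.mpr (fun x hx => hw x hx)
  rw [pv_strip_eq, pv_strip_eq, List.dropWhile_append]
  by_cases hu : u.dropWhile PySem.Chars.isspace = []
  · rw [if_pos (by rw [hu]; rfl), hu, hwnil]
  · rw [if_neg (by simp [hu]), List.reverse_append, List.dropWhile_append,
        if_pos (by rw [List.dropWhile_eq_nil_iff.mpr
          (fun x hx => hw x (List.mem_reverse.mp hx))]; rfl)]

-- strip ∘ lstrip = strip
lemma pv_strip_dropWhile (z : List Char) :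
    PySem.Chars.strip (z.dropWhile PySem.Chars.isspace) = PySem.Chars.strip z := by
  rw [pv_strip_eq, pv_strip_eq, pv_dropWhile_idem]

-- takeWhile commutes with a leading dropWhile when p holds on whitespace
lemma pv_takeWhile_dropWhile (p : Char → Bool) (hp : ∀ c, PySem.Chars.isspace c = true → p c = true)
    (x : List Char) :
    (x.dropWhile PySem.Chars.isspace).takeWhile p = (x.takeWhile p).dropWhile PySem.Chars.isspace := by
  induction x with
  | nil => rfl
  | cons a r ih =>
    by_cases hws : PySem.Chars.isspace a = true
    · rw [List.dropWhile_cons_of_pos hws, List.takeWhile_cons_of_pos (hp a hws),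
          List.dropWhile_cons_of_pos hws, ih]
    · rw [List.dropWhile_cons_of_neg (by simp [hws])]
      by_cases hpa : p a = true
      · rw [List.takeWhile_cons_of_pos hpa, List.dropWhile_cons_of_neg (by simp [hws])]
      · rw [List.takeWhile_cons_of_neg (by simp [hpa])]
        rfl

-- takeWhile past an all-whitespace suffix: only an all-whitespace suffix is added
lemma pv_takeWhile_append_ws (p : Char → Bool) (u w : List Char)
    (hw : ∀ c ∈ w, PySem.Chars.isspace c = true) :
    ∃ w', (∀ c ∈ w', PySem.Chars.isspace c = true) ∧ (u ++ w).takeWhile p = u.takeWhile p ++ w' := by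
  induction u with
  | nil =>
    exact ⟨w.takeWhile p, fun c hc => hw c (List.takeWhile_sublist _ |>.mem hc), by simp⟩
  | cons a r ih =>
    by_cases hpa : p a = true
    · obtain ⟨w', hw', he⟩ := ih
      exact ⟨w', hw', by rw [List.cons_append, List.takeWhile_cons_of_pos hpa,
                             List.takeWhile_cons_of_pos hpa, he, List.cons_append]⟩
    · exact ⟨[], by simp, by rw [List.cons_append, List.takeWhile_cons_of_neg (by simp [hpa]),
                                 List.takeWhile_cons_of_neg (by simp [hpa])]; rfl⟩

-- the central commutation: stripping before a whitespace-transparent takeWhile is absorbed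
lemma pv_strip_takeWhile_strip (p : Char → Bool)
    (hp : ∀ c, PySem.Chars.isspace c = true → p c = true) (x : List Char) :
    PySem.Chars.strip ((PySem.Chars.strip x).takeWhile p)
      = PySem.Chars.strip (x.takeWhile p) := by
  -- decompose lstrip x = rstrip(lstrip x) ++ (all-ws suffix)
  set y := x.dropWhile PySem.Chars.isspace with hy
  have hdec : y = (y.reverse.dropWhile PySem.Chars.isspace).reverse
      ++ (y.reverse.takeWhile PySem.Chars.isspace).reverse := by
    conv_rhs => rw [← List.reverse_append, List.takeWhile_append_dropWhile, List.reverse_reverse]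
  have hws : ∀ c ∈ (y.reverse.takeWhile PySem.Chars.isspace).reverse, PySem.Chars.isspace c = true := by
    intro c hc
    exact List.mem_takeWhile_imp (by simpa using hc)
  obtain ⟨w', hw', he⟩ := pv_takeWhile_append_ws p _ _ hws
  rw [pv_strip_eq x]
  calc PySem.Chars.strip (((y.reverse.dropWhile PySem.Chars.isspace).reverse).takeWhile p)
      = PySem.Chars.strip (((y.reverse.dropWhile PySem.Chars.isspace).reverse).takeWhile p ++ w') :=
        (pv_strip_append_ws _ _ hw').symm
    _ = PySem.Chars.strip (y.takeWhile p) := by rw [← he, ← hdec]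
    _ = PySem.Chars.strip ((x.takeWhile p).dropWhile PySem.Chars.isspace) := by
        rw [hy, pv_takeWhile_dropWhile p hp]
    _ = PySem.Chars.strip (x.takeWhile p) := pv_strip_dropWhile _

-- ---------- A's first split: head of splitOn is a takeWhile ----------
lemma pv_son_acc (sep : List Char) (fuel : Nat) (l cur : List Char) (acc : List (List Char)) :
    PySem.Chars.splitOn.go sep fuel l cur acc
      = acc.reverse ++ PySem.Chars.splitOn.go sep fuel l cur [] := by
  induction fuel generalizing l cur acc with
  | zero => simp [PySem.Chars.splitOn.go]
  | succ fuel ih =>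
    cases l with
    | nil => simp [PySem.Chars.splitOn.go]
    | cons a rest =>
      by_cases hp : sep.isPrefixOf (a :: rest) = true
      · rw [show PySem.Chars.splitOn.go sep (fuel+1) (a :: rest) cur acc
            = PySem.Chars.splitOn.go sep fuel (List.drop sep.length (a :: rest)) [] (cur.reverse :: acc) by
            simp [PySem.Chars.splitOn.go, hp],
           show PySem.Chars.splitOn.go sep (fuel+1) (a :: rest) cur []
            = PySem.Chars.splitOn.go sep fuel (List.drop sep.length (a :: rest)) [] [cur.reverse] by
            simp [PySem.Chars.splitOn.go, hp],
           ih, ih (acc := [cur.reverse])]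
        simp
      · rw [show PySem.Chars.splitOn.go sep (fuel+1) (a :: rest) cur acc
            = PySem.Chars.splitOn.go sep fuel rest (a :: cur) acc by
            simp [PySem.Chars.splitOn.go, hp],
           show PySem.Chars.splitOn.go sep (fuel+1) (a :: rest) cur []
            = PySem.Chars.splitOn.go sep fuel rest (a :: cur) [] by
            simp [PySem.Chars.splitOn.go, hp],
           ih]

lemma pv_son_headD (c : Char) (fuel : Nat) (l cur : List Char) (hf : l.length < fuel) :
    (PySem.Chars.splitOn.go [c] fuel l cur []).headD []
      = cur.reverse ++ l.takeWhile (fun a => decide (a ≠ c)) := by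
  induction fuel generalizing l cur with
  | zero => omega
  | succ fuel ih =>
    cases l with
    | nil => simp [PySem.Chars.splitOn.go]
    | cons a rest =>
      by_cases hp : a = c
      · subst hp
        rw [show PySem.Chars.splitOn.go [a] (fuel+1) (a :: rest) cur []
            = PySem.Chars.splitOn.go [a] fuel (List.drop 1 (a :: rest)) [] [cur.reverse] by
            simp [PySem.Chars.splitOn.go, List.isPrefixOf],
           pv_son_acc]
        simp
      · rw [show PySem.Chars.splitOn.go [c] (fuel+1) (a :: rest) cur []
            = PySem.Chars.splitOn.go [c] fuel rest (a :: cur) [] by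
            simp [PySem.Chars.splitOn.go, List.isPrefixOf]
            exact fun h => absurd h.symm hp]
        rw [ih rest (a :: cur) (by simp at hf ⊢; omega)]
        simp [hp]

lemma pv_splitOn_head (t : List Char) :
    (PySem.Chars.splitOn t [';']).headD [] = t.takeWhile (fun a => decide (a ≠ ';')) := by
  have hgo : PySem.Chars.splitOn t [';'] = PySem.Chars.splitOn.go [';'] (t.length + 1) t [] [] := by
    simp [PySem.Chars.splitOn]
  rw [hgo]
  simpa using pv_son_headD ';' (t.length + 1) t [] (by omega)

-- ---------- A's marker fold (split(m,1) per marker) is a takeWhile ----------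
lemma pv_go_acc (sep : List Char) (fuel m : Nat) (l cur : List Char) (acc : List (List Char)) :
    PySem.Chars.splitOnMax.go sep fuel m l cur acc
      = acc.reverse ++ PySem.Chars.splitOnMax.go sep fuel m l cur [] := by
  induction fuel generalizing m l cur acc with
  | zero => simp [PySem.Chars.splitOnMax.go]
  | succ fuel ih =>
    cases l with
    | nil => simp [PySem.Chars.splitOnMax.go]
    | cons a rest =>
      by_cases hm : m = 0
      · simp [PySem.Chars.splitOnMax.go, hm]
      · by_cases hp : sep.isPrefixOf (a :: rest) = true
        · rw [show PySem.Chars.splitOnMax.go sep (fuel+1) m (a :: rest) cur acc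
              = PySem.Chars.splitOnMax.go sep fuel (m-1) (List.drop sep.length (a :: rest)) [] (cur.reverse :: acc) by
              simp [PySem.Chars.splitOnMax.go, hm, hp],
             show PySem.Chars.splitOnMax.go sep (fuel+1) m (a :: rest) cur []
              = PySem.Chars.splitOnMax.go sep fuel (m-1) (List.drop sep.length (a :: rest)) [] [cur.reverse] by
              simp [PySem.Chars.splitOnMax.go, hm, hp],
             ih, ih (acc := [cur.reverse])]
          simp
        · rw [show PySem.Chars.splitOnMax.go sep (fuel+1) m (a :: rest) cur acc
              = PySem.Chars.splitOnMax.go sep fuel m rest (a :: cur) acc by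
              simp [PySem.Chars.splitOnMax.go, hm, hp],
             show PySem.Chars.splitOnMax.go sep (fuel+1) m (a :: rest) cur []
              = PySem.Chars.splitOnMax.go sep fuel m rest (a :: cur) [] by
              simp [PySem.Chars.splitOnMax.go, hm, hp],
             ih]

lemma pv_go_ne_nil (sep : List Char) (fuel m : Nat) (l cur : List Char) :
    PySem.Chars.splitOnMax.go sep fuel m l cur [] ≠ [] := by
  cases fuel with
  | zero => simp [PySem.Chars.splitOnMax.go]
  | succ fuel =>
    cases l with
    | nil => simp [PySem.Chars.splitOnMax.go]
    | cons a rest =>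
      by_cases hm : m = 0
      · simp [PySem.Chars.splitOnMax.go, hm]
      · by_cases hp : sep.isPrefixOf (a :: rest) = true
        · rw [show PySem.Chars.splitOnMax.go sep (fuel+1) m (a :: rest) cur []
              = PySem.Chars.splitOnMax.go sep fuel (m-1) (List.drop sep.length (a :: rest)) [] [cur.reverse] by
              simp [PySem.Chars.splitOnMax.go, hm, hp],
             pv_go_acc]
          simp
        · rw [show PySem.Chars.splitOnMax.go sep (fuel+1) m (a :: rest) cur []
              = PySem.Chars.splitOnMax.go sep fuel m rest (a :: cur) [] by
              simp [PySem.Chars.splitOnMax.go, hm, hp]]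
          exact pv_go_ne_nil sep fuel m rest (a :: cur)

lemma pv_go_headD (c : Char) (fuel m : Nat) (l cur : List Char)
    (hm : m ≠ 0) (hf : l.length < fuel) :
    (PySem.Chars.splitOnMax.go [c] fuel m l cur []).headD []
      = cur.reverse ++ l.takeWhile (fun a => decide (a ≠ c)) := by
  induction fuel generalizing m l cur with
  | zero => omega
  | succ fuel ih =>
    cases l with
    | nil => simp [PySem.Chars.splitOnMax.go]
    | cons a rest =>
      by_cases hp : a = c
      · subst hp
        rw [show PySem.Chars.splitOnMax.go [a] (fuel+1) m (a :: rest) cur []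
            = PySem.Chars.splitOnMax.go [a] fuel (m-1) (List.drop 1 (a :: rest)) [] [cur.reverse] by
            simp [PySem.Chars.splitOnMax.go, hm, List.isPrefixOf],
           pv_go_acc]
        cases h : PySem.Chars.splitOnMax.go [a] fuel (m-1) (List.drop 1 (a :: rest)) [] [] with
        | nil => exact absurd h (pv_go_ne_nil _ _ _ _ _)
        | cons x xs => simp
      · rw [show PySem.Chars.splitOnMax.go [c] (fuel+1) m (a :: rest) cur []
            = PySem.Chars.splitOnMax.go [c] fuel m rest (a :: cur) [] by
            simp [PySem.Chars.splitOnMax.go, hm, List.isPrefixOf]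
            exact fun h => absurd h.symm hp]
        rw [ih m rest (a :: cur) hm (by simp at hf ⊢; omega)]
        simp [hp]

lemma pv_singleton_infix (c : Char) (t : List Char) : [c] <:+: t ↔ c ∈ t := by
  constructor
  · intro h; exact h.mem (by simp)
  · intro h
    obtain ⟨s1, s2, rfl⟩ := List.append_of_mem h
    exact ⟨s1, s2, by simp⟩

lemma pv_step (c : Char) (t : List Char) :
    (if PySem.Chars.isIn [c] t then (PySem.Chars.splitOnMax t [c] 1).headD [] else t)
      = t.takeWhile (fun a => decide (a ≠ c)) := by
  by_cases h : PySem.Chars.isIn [c] t = true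
  · rw [if_pos h]
    unfold PySem.Chars.splitOnMax
    rw [if_neg (by norm_num)]
    simpa using pv_go_headD c (t.length + 1) 1 t [] (by omega) (by omega)
  · rw [if_neg h]
    have hmem : c ∉ t := by
      intro hc
      exact h ((PySem.Chars.isIn_iff_infix _ _).mpr ((pv_singleton_infix c t).mpr hc))
    symm
    rw [List.takeWhile_eq_self_iff]
    intro a ha
    simp only [decide_eq_true_eq]
    rintro rfl; exact hmem ha

lemma pv_fold (ms : List Char) (t : List Char) :
    ms.foldl (fun t m => if PySem.Chars.isIn [m] t then (PySem.Chars.splitOnMax t [m] 1).headD [] else t) t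
      = t.takeWhile (fun a => !ms.contains a) := by
  induction ms generalizing t with
  | nil => simp only [List.foldl_nil, List.contains_nil, Bool.not_false]
           exact (List.takeWhile_eq_self_iff.mpr (by simp)).symm
  | cons m ms ih =>
    rw [List.foldl_cons, pv_step, ih, List.takeWhile_takeWhile]
    congr 1
    funext a
    by_cases ha : a = m <;> simp [ha]

-- the two staged predicates of A combine to B's seven-delimiter predicate
lemma pv_p7_combine (a : Char) :
    decide ((!pvMarkers.contains a) = true ∧ decide (a ≠ ';') = true) = pvP7 a := by
  by_cases h : a = ';'
  · subst h; decide
  · unfold pvMarkers pvP7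
    simp [h]

-- ---------- A's final lower+replace is B's per-character map ----------
lemma pv_replace_map (cs : List Char) :
    PySem.Chars.replace cs ['_'] ['-'] = cs.map (fun c => if c = '_' then '-' else c) := by
  suffices h : ∀ (fuel : Nat) (l acc : List Char), l.length ≤ fuel →
      PySem.Chars.replace.go ['_'] ['-'] fuel l acc
        = acc.reverse ++ l.map (fun c => if c = '_' then '-' else c) by
    unfold PySem.Chars.replace
    simpa using h cs.length cs [] le_rfl
  intro fuel
  induction fuel with
  | zero =>
    intro l acc hl
    have hnil : l = [] := List.length_eq_zero_iff.mp (by omega)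
    subst hnil
    simp [PySem.Chars.replace.go]
  | succ fuel ih =>
    intro l acc hl
    cases l with
    | nil => simp [PySem.Chars.replace.go]
    | cons a rest =>
      by_cases ha : a = '_'
      · subst ha
        rw [show PySem.Chars.replace.go ['_'] ['-'] (fuel+1) ('_' :: rest) acc
            = PySem.Chars.replace.go ['_'] ['-'] fuel rest ('-' :: acc) by
            simp [PySem.Chars.replace.go, List.isPrefixOf],
           ih rest _ (by simp at hl; omega)]
        simp
      · rw [show PySem.Chars.replace.go ['_'] ['-'] (fuel+1) (a :: rest) acc
            = PySem.Chars.replace.go ['_'] ['-'] fuel rest (a :: acc) by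
            simp [PySem.Chars.replace.go, List.isPrefixOf]
            exact fun h => absurd h.symm ha,
           ih rest _ (by simp at hl; omega)]
        simp [ha]

lemma pv_lower_replace (cs : List Char) :
    PySem.Chars.replace (PySem.Chars.lower cs) ['_'] ['-'] = cs.map pvF := by
  rw [show PySem.Chars.lower cs = cs.map PySem.Chars.lowerChar by simp [PySem.Chars.lower],
      pv_replace_map, List.map_map]
  apply List.map_congr_left
  intro a _
  simp only [Function.comp_apply, pvF]
  by_cases h : PySem.Chars.lowerChar a = '_'
  · rw [if_pos h, if_pos ((pv_lowerChar_underscore a).mp h)]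
  · rw [if_neg h, if_neg (fun hc => h ((pv_lowerChar_underscore a).mpr hc))]

-- ---------- strip commutes with B's map ----------
lemma pv_strip_map (z : List Char) :
    PySem.Chars.strip (z.map pvF) = (PySem.Chars.strip z).map pvF := by
  have hcomp : PySem.Chars.isspace ∘ pvF = PySem.Chars.isspace := funext pv_isspace_pvF
  rw [pv_strip_eq, pv_strip_eq, List.dropWhile_map, hcomp, ← List.map_reverse,
      List.dropWhile_map, hcomp, List.map_reverse]

-- ---------- B's scan is a map over a takeWhile ----------
lemma pv_scanB_eq (t : List Char) : pvScanB t = (t.takeWhile pvP7).map pvF := by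
  induction t with
  | nil => rfl
  | cons a rest ih =>
    have e : pvScanB (a :: rest)
        = if ([';', '[', '=', '<', '>', '!', '~'] : List Char).contains a then []
          else (if a = '_' then '-' else PySem.Chars.lowerChar a) :: pvScanB rest := rfl
    by_cases h : ([';', '[', '=', '<', '>', '!', '~'] : List Char).contains a = true
    · have hp : pvP7 a = false := by unfold pvP7; rw [h]; rfl
      rw [e, if_pos h, List.takeWhile_cons_of_neg (by rw [hp]; exact Bool.false_ne_true)]
      rfl
    · have hp : pvP7 a = true := by
        unfold pvP7
        rw [Bool.eq_false_iff.mpr h]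
        rfl
      rw [e, if_neg h, List.takeWhile_cons_of_pos hp, List.map_cons, ih]
      rfl

-- ===== VERDICT (by name: the statement is the Claim_ definition above) =====
theorem normalize_dependency_name_py_spec : Claim_equal_normalize_dependency_name_py := by
  intro spec _
  unfold Spec_normalize_dependency_name_py normalize_dependency_name_py normalize_dependency_name_py_alt
  rw [pv_scanB_eq, pv_strip_map]
  simp only [pv_splitOn_head, pv_fold, pv_lower_replace]
  split_ifs with hempty
  · have hws := (pv_strip_nil_iff spec.toList).mp hempty
    have h7 : spec.toList.takeWhile pvP7 = spec.toList :=
      List.takeWhile_eq_self_iff.mpr (fun a ha => pv_ws_p7 a (hws a ha))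
    rw [h7, hempty]
    rfl
  · refine congrArg String.ofList ?_
    calc (PySem.Chars.strip
            ((PySem.Chars.strip
              ((PySem.Chars.strip spec.toList).takeWhile (fun a => decide (a ≠ ';')))).takeWhile
                (fun a => !pvMarkers.contains a))).map pvF
        = (PySem.Chars.strip
            (((PySem.Chars.strip spec.toList).takeWhile (fun a => decide (a ≠ ';'))).takeWhile
                (fun a => !pvMarkers.contains a))).map pvF := by
          rw [pv_strip_takeWhile_strip _ (fun c hc => ?_) _]
          have h7 := pv_ws_p7 c hc
          unfold pvP7 at h7
          unfold pvMarkers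
          simp only [List.contains_cons, List.contains_nil, Bool.not_eq_true',
                     Bool.or_eq_false_iff] at h7 ⊢
          exact ⟨h7.2.1, h7.2.2.1, h7.2.2.2.1, h7.2.2.2.2.1, h7.2.2.2.2.2.1, h7.2.2.2.2.2.2⟩
    _ = (PySem.Chars.strip ((PySem.Chars.strip spec.toList).takeWhile pvP7)).map pvF := by
          rw [List.takeWhile_takeWhile, funext pv_p7_combine]
    _ = (PySem.Chars.strip (spec.toList.takeWhile pvP7)).map pvF := by
          rw [pv_strip_takeWhile_strip _ pv_ws_p7]
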